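-- pv_equiv track=rewrite | github.com/higorspinto/phone-extractor | phone_extractor/phone_extractor/spiders/main_spider.py | phone_light_cleaning
-- ===== SOURCE A (Python) =====
-- def phone_light_cleaning(phone):
--     '''
--     replace any characters that are not digits,
--     a plus sign (+) or parentheses with whitespace
--     '''
--     filtered_str = ''
--     allowed_chars = ['0','1','2','3','4','5','6','7','8','9','(',')','+']
--     for char in phone:
--         if char in allowed_chars:
--             filtered_str += char
--         else:
--             filtered_str += ' '
--
--     return filtered_str
-- ===== SOURCE B (Python) =====
-- def phone_light_cleaning(phone):
--     '''
--     replace any characters that are not digits,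
--     a plus sign (+) or parentheses with whitespace
--     '''
--     allowed = '0123456789()+'
--     pieces = []
--     i = 0
--     n = len(phone)
--     while i < n:
--         # copy a maximal run of allowed characters as one slice
--         j = i
--         while j < n and phone[j] in allowed:
--             j += 1
--         pieces.append(phone[i:j])
--         # replace a maximal run of disallowed characters by one block of spaces
--         k = j
--         while k < n and phone[k] not in allowed:
--             k += 1
--         pieces.append(' ' * (k - j))
--         i = k
--     return ''.join(pieces)
-- ===== Notes on version B (the rewrite author's own statement) =====
-- stated objective: faster
-- what changed: Replaces A's per-character accumulation loop (one membership test and one string concatenation per char) by a run-based two-pointer scan that copies each maximal run of allowed characters as a single slice and emits each maximal disallowed run as one block of spaces, joining the pieces once at the end.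
import Mathlib
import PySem

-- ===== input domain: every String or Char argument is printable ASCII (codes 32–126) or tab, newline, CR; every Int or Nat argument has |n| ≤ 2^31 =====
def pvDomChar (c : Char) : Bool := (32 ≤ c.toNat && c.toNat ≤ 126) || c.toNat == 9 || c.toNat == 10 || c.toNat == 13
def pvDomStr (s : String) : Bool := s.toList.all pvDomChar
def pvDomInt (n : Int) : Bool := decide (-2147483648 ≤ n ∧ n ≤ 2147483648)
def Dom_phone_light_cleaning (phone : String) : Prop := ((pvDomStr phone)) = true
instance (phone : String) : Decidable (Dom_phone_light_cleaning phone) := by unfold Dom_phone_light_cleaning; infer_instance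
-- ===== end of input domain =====

-- B replaces A's per-character accumulation loop by a run-based two-pointer scan:
-- maximal allowed runs are copied as whole slices, maximal disallowed runs become
-- one block of spaces each; same return value on every string.

-- ===== PORT A =====
-- the literal allowed_chars list from A
def pvAllowedChars : List Char := ['0','1','2','3','4','5','6','7','8','9','(',')','+']

-- for char in phone: filtered_str += char if allowed else ' '
def phone_light_cleaning (phone : String) : String :=
  String.mk <|
    phone.toList.foldl (fun filtered c =>
      if c ∈ pvAllowedChars then filtered ++ [c] else filtered ++ [' ']) []

-- ===== PORT B =====
-- B's membership test `ch in '0123456789()+'`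
def pvAllowed (c : Char) : Bool := "0123456789()+".toList.contains c

-- termination of the run loop: consuming one allowed run then one disallowed run
-- strictly shrinks a nonempty suffix
theorem pv_runs_shrink (c : Char) (t : List Char) :
    (((c :: t).dropWhile pvAllowed).dropWhile (fun x => !pvAllowed x)).length
      < (c :: t).length := by
  by_cases h : pvAllowed c
  · calc (((c :: t).dropWhile pvAllowed).dropWhile (fun x => !pvAllowed x)).length
        ≤ ((c :: t).dropWhile pvAllowed).length := List.length_dropWhile_le _ _
      _ = (t.dropWhile pvAllowed).length := by rw [List.dropWhile_cons_of_pos h]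
      _ ≤ t.length := List.length_dropWhile_le _ _
      _ < (c :: t).length := by simp
  · have h1 : (c :: t).dropWhile pvAllowed = c :: t :=
      List.dropWhile_cons_of_neg (by simpa using h)
    rw [h1, List.dropWhile_cons_of_pos (by simpa using h)]
    calc (t.dropWhile (fun x => !pvAllowed x)).length
        ≤ t.length := List.length_dropWhile_le _ _
      _ < (c :: t).length := by simp

-- the outer while loop of B: emit the allowed run, then the disallowed run as spaces
def pvRuns : List Char → List Char
  | [] => []
  | c :: t =>
    let good := (c :: t).takeWhile pvAllowed
    let rest := (c :: t).dropWhile pvAllowed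
    let bad := rest.takeWhile (fun x => !pvAllowed x)
    let rest2 := rest.dropWhile (fun x => !pvAllowed x)
    good ++ List.replicate bad.length ' ' ++ pvRuns rest2
  termination_by l => l.length
  decreasing_by exact pv_runs_shrink c t

def phone_light_cleaning_alt (phone : String) : String :=
  String.mk (pvRuns phone.toList)

-- ===== PRECONDITION & SPEC =====
def Spec_phone_light_cleaning (phone : String) (out : String) : Prop := out = phone_light_cleaning_alt phone
instance (phone : String) (out : String) : Decidable (Spec_phone_light_cleaning phone out) := by unfold Spec_phone_light_cleaning; infer_instance

-- ===== CLAIM (what is proved, stated in full; the proofs are below) =====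
def Claim_equal_phone_light_cleaning : Prop := ∀ (phone : String), Dom_phone_light_cleaning phone → Spec_phone_light_cleaning phone (phone_light_cleaning phone)

-- ===== LEMMAS AND PROOFS =====
-- the common per-character value both programs realise
def pvF (c : Char) : Char := if pvAllowed c then c else ' '

-- A's membership test agrees with B's (same characters)
theorem pv_mem_iff (c : Char) : c ∈ pvAllowedChars ↔ pvAllowed c = true := by
  constructor
  · intro h; fin_cases h <;> decide
  · intro h
    simp [pvAllowed] at h
    rcases h with h|h|h|h|h|h|h|h|h|h|h|h|h <;> subst h <;> decide

-- A's accumulating fold computes the pointwise map, prefixed by the accumulator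
theorem pv_fold (l acc : List Char) :
    l.foldl (fun filtered c =>
      if c ∈ pvAllowedChars then filtered ++ [c] else filtered ++ [' ']) acc =
    acc ++ l.map pvF := by
  induction l generalizing acc with
  | nil => simp
  | cons c t ih =>
    simp only [List.foldl_cons, List.map_cons]
    by_cases h : pvAllowed c
    · rw [if_pos ((pv_mem_iff c).mpr h), ih]; simp [pvF, h]
    · rw [if_neg (fun hc => h ((pv_mem_iff c).mp hc)), ih]; simp [pvF, h]

-- B's run-based scan also computes the pointwise map
theorem pv_runs_eq_map (l : List Char) : pvRuns l = l.map pvF := by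
  induction l using pvRuns.induct with
  | case1 => simp [pvRuns]
  | case2 c t x1 x2 ih =>
    rw [pvRuns]
    set good := (c :: t).takeWhile pvAllowed with hg
    set rest := (c :: t).dropWhile pvAllowed with hr
    set bad := rest.takeWhile (fun x => !pvAllowed x) with hb
    set rest2 := rest.dropWhile (fun x => !pvAllowed x) with hr2
    have hgood : good.map pvF = good := by
      apply List.map_congr_left ?_ |>.trans (List.map_id _)
      intro x hx
      have := List.mem_takeWhile_imp hx
      simp [pvF, this]
    have hbad : bad.map pvF = List.replicate bad.length ' ' := by
      have : ∀ x ∈ bad, pvF x = ' ' := by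
        intro x hx
        have := List.mem_takeWhile_imp hx
        simp at this
        simp [pvF, this]
      calc bad.map pvF = bad.map (fun _ => ' ') := List.map_congr_left this
        _ = List.replicate bad.length ' ' := by simp
    calc good ++ List.replicate bad.length ' ' ++ pvRuns rest2
        = good.map pvF ++ (bad.map pvF ++ rest2.map pvF) := by
          rw [hgood, hbad, ih]
          simp only [List.append_assoc]
          rfl
      _ = good.map pvF ++ (bad ++ rest2).map pvF := by rw [List.map_append]
      _ = good.map pvF ++ rest.map pvF := by
          rw [List.takeWhile_append_dropWhile]
      _ = (good ++ rest).map pvF := by rw [List.map_append]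
      _ = (c :: t).map pvF := by rw [List.takeWhile_append_dropWhile]

-- ===== VERDICT (by name: the statement is the Claim_ definition above) =====
theorem phone_light_cleaning_spec : Claim_equal_phone_light_cleaning := by
  intro phone _
  show _ = _
  simp [phone_light_cleaning, phone_light_cleaning_alt, pv_fold, pv_runs_eq_map]
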